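-- pv_equiv track=rewrite | github.com/shakey0/Games0Project | Games0App/utils.py | word_chunk
-- ===== SOURCE A (Python) =====
-- def word_chunk(chunk):
--     units = ['','one','two','three','four','five','six','seven','eight','nine']
--     teens = ['','eleven','twelve','thirteen','fourteen','fifteen','sixteen', 'seventeen','eighteen','nineteen']
--     tens = ['','ten','twenty','thirty','forty','fifty','sixty','seventy','eighty','ninety']
--
--     if chunk == 0:
--         return ''
--     elif chunk < 10:
--         return units[chunk]
--     elif chunk < 20:
--         return teens[chunk-10]
--     elif chunk < 100:
--         return tens[chunk//10] + ('' if chunk % 10 == 0 else ' ' + units[chunk % 10])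
--     else:
--         return units[chunk//100] + ' hundred' + ('' if chunk % 100 == 0 else ' and ' + word_chunk(chunk % 100))
-- ===== SOURCE B (Python) =====
-- def word_chunk(chunk):
--     units = ['','one','two','three','four','five','six','seven','eight','nine']
--     teens = ['','eleven','twelve','thirteen','fourteen','fifteen','sixteen', 'seventeen','eighteen','nineteen']
--     tens = ['','ten','twenty','thirty','forty','fifty','sixty','seventy','eighty','ninety']
--
--     h, rem = divmod(chunk, 100)
--     if rem < 10:
--         small = units[rem]
--     elif rem < 20:
--         small = teens[rem - 10]
--     else:
--         small = tens[rem // 10]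
--         if rem % 10:
--             small += ' ' + units[rem % 10]
--     if h == 0:
--         return small
--     out = units[h] + ' hundred'
--     if rem:
--         out += ' and ' + small
--     return out
-- ===== Notes on version B (the rewrite author's own statement) =====
-- stated objective: simpler
-- what changed: Replaces A's self-recursion and early-return chain by a flat non-recursive decomposition: compute (h, rem) = divmod(chunk, 100) once, build the 0-99 word with branches over the same tables, then prefix the hundreds part.
-- outside the precondition, e.g. on word_chunk(-1): A returns 'nine', B returns 'nine hundred and ninety nine'; on word_chunk(-10): A returns '', B returns 'nine hundred and ninety'
import Mathlib
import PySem

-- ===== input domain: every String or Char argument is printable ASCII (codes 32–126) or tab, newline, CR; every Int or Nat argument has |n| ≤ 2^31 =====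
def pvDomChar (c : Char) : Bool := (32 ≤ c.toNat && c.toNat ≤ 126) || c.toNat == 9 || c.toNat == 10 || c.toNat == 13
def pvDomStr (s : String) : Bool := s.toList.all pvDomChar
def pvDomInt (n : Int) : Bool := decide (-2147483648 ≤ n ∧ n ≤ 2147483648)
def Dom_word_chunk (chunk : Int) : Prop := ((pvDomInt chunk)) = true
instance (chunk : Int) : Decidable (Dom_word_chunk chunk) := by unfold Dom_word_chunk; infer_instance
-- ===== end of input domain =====

-- B replaces A's self-recursion by a flat divmod-first decomposition (objective: simpler).
-- Equivalence is claimed on the natural domain 0 ≤ chunk < 1000 (see Pre_ below).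

-- ===== PORT A =====
def unitsTbl : List String := ["","one","two","three","four","five","six","seven","eight","nine"]
def teensTbl : List String := ["","eleven","twelve","thirteen","fourteen","fifteen","sixteen","seventeen","eighteen","nineteen"]
def tensTbl : List String := ["","ten","twenty","thirty","forty","fifty","sixty","seventy","eighty","ninety"]

-- A recurses once (the recursive call's argument is < 100, so it never recurses again);
-- the fuel is a totality guard only and is never exhausted on any input.
-- Pre_ keeps every index in range, so the '.getD ""' default for pyGet? is never used inside Pre_.
def wordChunkFuel : Nat → Int → String
  | 0, _ => ""
  | Nat.succ fuel, chunk =>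
    if chunk == 0 then ""
    else if chunk < 10 then (PySem.List.pyGet? unitsTbl chunk).getD ""
    else if chunk < 20 then (PySem.List.pyGet? teensTbl (chunk - 10)).getD ""
    else if chunk < 100 then
      (PySem.List.pyGet? tensTbl (PySem.Int.floordiv chunk 10)).getD "" ++
        (if PySem.Int.mod chunk 10 == 0 then "" else " " ++ (PySem.List.pyGet? unitsTbl (PySem.Int.mod chunk 10)).getD "")
    else
      (PySem.List.pyGet? unitsTbl (PySem.Int.floordiv chunk 100)).getD "" ++ " hundred" ++
        (if PySem.Int.mod chunk 100 == 0 then "" else " and " ++ wordChunkFuel fuel (PySem.Int.mod chunk 100))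

def word_chunk (chunk : Int) : String := wordChunkFuel 2 chunk

-- ===== PORT B =====
def word_chunk_alt (chunk : Int) : String :=
  let h := PySem.Int.floordiv chunk 100
  let rem := PySem.Int.mod chunk 100
  let small :=
    if rem < 10 then (PySem.List.pyGet? unitsTbl rem).getD ""
    else if rem < 20 then (PySem.List.pyGet? teensTbl (rem - 10)).getD ""
    else
      (PySem.List.pyGet? tensTbl (PySem.Int.floordiv rem 10)).getD "" ++
        (if PySem.Int.mod rem 10 == 0 then "" else " " ++ (PySem.List.pyGet? unitsTbl (PySem.Int.mod rem 10)).getD "")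
  if h == 0 then small
  else
    let out := (PySem.List.pyGet? unitsTbl h).getD "" ++ " hundred"
    if rem == 0 then out else out ++ " and " ++ small

-- ===== PRECONDITION & SPEC =====
-- Pre_ restricts to the function's natural domain 0 ≤ chunk < 1000: outside it A either
-- raises IndexError (chunk ≥ 1000 or chunk ≤ -11) or returns a negative-index-wraparound
-- artefact (e.g. word_chunk(-1) = 'nine') that no caller relies on.
def Pre_word_chunk (chunk : Int) : Prop := 0 ≤ chunk ∧ chunk < 1000
instance (chunk : Int) : Decidable (Pre_word_chunk chunk) := by unfold Pre_word_chunk; infer_instance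
def pvWitness_word_chunk : Int := (117)

def Spec_word_chunk (chunk : Int) (out : String) : Prop := out = word_chunk_alt chunk
instance (chunk : Int) (out : String) : Decidable (Spec_word_chunk chunk out) := by unfold Spec_word_chunk; infer_instance

-- ===== CLAIM (what is proved, stated in full; the proofs are below) =====
def Claim_equal_word_chunk : Prop := ∀ (chunk : Int), Dom_word_chunk chunk → Pre_word_chunk chunk → Spec_word_chunk chunk (word_chunk chunk)

-- ===== LEMMAS AND PROOFS =====
set_option maxRecDepth 10000 in
lemma word_chunk_eq_alt_nat : ∀ n : Nat, n < 1000 → word_chunk (n : Int) = word_chunk_alt (n : Int) := by decide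

-- ===== VERDICT (by name: the statement is the Claim_ definition above) =====
theorem word_chunk_spec : Claim_equal_word_chunk := by
  intro chunk _ hpre
  obtain ⟨h0, h1⟩ := hpre
  have hn : chunk = ((chunk.toNat : Nat) : Int) := (Int.toNat_of_nonneg h0).symm
  have hlt : chunk.toNat < 1000 := by omega
  show word_chunk chunk = word_chunk_alt chunk
  rw [hn]
  exact word_chunk_eq_alt_nat chunk.toNat hlt
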